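-- pv_equiv track=rewrite | github.com/pjeannin/AdventOfCode2021 | Day05/main.py | calc_number
-- ===== SOURCE A (Python) =====
-- def calc_number(coords):
--     i = 0
--     count = 0
--     overlaps = dict()
--     for coord in coords:
--         if coord not in overlaps:
--             overlaps[coord] = 1
--         else:
--             overlaps[coord] += 1
--     for value in overlaps.values():
--         if value > 1:
--             count += 1
--     return count
-- ===== SOURCE B (Python) =====
-- def calc_number(coords):
--     seen = set()
--     duplicates = set()
--     for coord in coords:
--         if coord in seen:
--             duplicates.add(coord)
--         else:
--             seen.add(coord)
--     return len(duplicates)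
-- ===== Notes on version B (the rewrite author's own statement) =====
-- stated objective: simpler
-- what changed: Replaced the frequency dict plus a second counting pass over its values with a single pass maintaining two sets (seen, duplicates) and returning the size of duplicates.
import Mathlib
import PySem

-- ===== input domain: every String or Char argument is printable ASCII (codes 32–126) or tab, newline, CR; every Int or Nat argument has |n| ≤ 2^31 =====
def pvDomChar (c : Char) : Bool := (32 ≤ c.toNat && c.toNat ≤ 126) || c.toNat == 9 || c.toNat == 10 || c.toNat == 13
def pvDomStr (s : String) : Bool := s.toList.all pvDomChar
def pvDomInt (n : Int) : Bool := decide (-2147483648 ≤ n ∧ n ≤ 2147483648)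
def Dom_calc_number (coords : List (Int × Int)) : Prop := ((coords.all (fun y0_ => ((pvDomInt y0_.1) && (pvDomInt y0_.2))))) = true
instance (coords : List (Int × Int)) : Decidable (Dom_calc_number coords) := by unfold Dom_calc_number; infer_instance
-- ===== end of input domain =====

-- B replaces A's frequency dict + second counting pass by one pass over the coords
-- maintaining two sets (seen, duplicates) and returns the size of duplicates (objective: simpler).

-- ===== PORT A =====
-- (A's variable `i` is dead code and is omitted.)
def calc_number (coords : List (Int × Int)) : Int :=
  let overlaps : PySem.Dict (Int × Int) Int :=
    coords.foldl (fun overlaps coord =>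
      if !(overlaps.contains coord) then overlaps.insert coord 1
      else overlaps.insert coord (overlaps.getD coord 0 + 1)) PySem.Dict.empty
  overlaps.values.foldl (fun count value => if value > 1 then count + 1 else count) 0

-- ===== PORT B =====
def calc_number_alt (coords : List (Int × Int)) : Int :=
  let st :=
    coords.foldl (fun (st : PySem.Set (Int × Int) × PySem.Set (Int × Int)) coord =>
      if st.1.contains coord then (st.1, st.2.add coord) else (st.1.add coord, st.2))
      (PySem.Set.empty, PySem.Set.empty)
  PySem.Set.len st.2

-- ===== PRECONDITION & SPEC =====
def Spec_calc_number (coords : List (Int × Int)) (out : Int) : Prop := out = calc_number_alt coords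
instance (coords : List (Int × Int)) (out : Int) : Decidable (Spec_calc_number coords out) := by unfold Spec_calc_number; infer_instance

-- ===== CLAIM (what is proved, stated in full; the proofs are below) =====
def Claim_equal_calc_number : Prop := ∀ (coords : List (Int × Int)), Dom_calc_number coords → Spec_calc_number coords (calc_number coords)

-- ===== LEMMAS AND PROOFS =====

-- A's counting loop builds exactly the counter of coords.
lemma calcA_dict_eq_counter (coords : List (Int × Int)) :
    coords.foldl (fun overlaps coord =>
      if !(overlaps.contains coord) then overlaps.insert coord 1
      else overlaps.insert coord (overlaps.getD coord 0 + 1)) PySem.Dict.empty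
    = PySem.Dict.counter coords := by
  rw [show (fun (overlaps : PySem.Dict (Int × Int) Int) coord =>
      if !(overlaps.contains coord) then overlaps.insert coord 1
      else overlaps.insert coord (overlaps.getD coord 0 + 1))
      = (fun d x => d.insert x (d.getD x 0 + 1)) from ?_,
    PySem.Dict.foldl_insert_getD_add_one_eq_counter]
  funext d x
  by_cases h : d.contains x = true
  · simp [h]
  · simp only [Bool.not_eq_true] at h
    simp [h, PySem.Dict.getD_of_not_contains d 0 h]

-- Invariant of B's single pass: after processing `pre`, `dups` holds (without
-- duplicates) exactly the coordinates occurring at least twice in `pre`.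
lemma calcB_inv (l : List (Int × Int)) : ∀ (pre : List (Int × Int))
    (seen dups : PySem.Set (Int × Int)),
    (∀ c, c ∈ seen ↔ c ∈ pre) → dups.Nodup → (∀ c, c ∈ dups ↔ 2 ≤ pre.count c) →
    (l.foldl (fun (st : PySem.Set (Int × Int) × PySem.Set (Int × Int)) coord =>
      if st.1.contains coord then (st.1, st.2.add coord) else (st.1.add coord, st.2))
      (seen, dups)).2.Nodup ∧
    (∀ c, c ∈ (l.foldl (fun (st : PySem.Set (Int × Int) × PySem.Set (Int × Int)) coord =>
      if st.1.contains coord then (st.1, st.2.add coord) else (st.1.add coord, st.2))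
      (seen, dups)).2 ↔ 2 ≤ (pre ++ l).count c) := by
  induction l with
  | nil =>
    intro pre seen dups hseen hnd hdup
    simp only [List.foldl_nil, List.append_nil]
    exact ⟨hnd, hdup⟩
  | cons x t ih =>
    intro pre seen dups hseen hnd hdup
    by_cases hx : seen.contains x = true
    · have hxpre : x ∈ pre := (hseen x).mp ((PySem.Set.contains_iff seen x).mp hx)
      have step := ih (pre ++ [x]) seen (dups.add x)
        (by
          intro c
          rw [hseen c, List.mem_append, List.mem_singleton]
          constructor
          · exact Or.inl
          · rintro (h | h)
            · exact h
            · rw [h]; exact hxpre)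
        (PySem.Set.nodup_add dups x hnd)
        (by
          intro c
          rw [PySem.Set.mem_add, hdup c]
          by_cases hcx : c = x
          · have h1 : 1 ≤ pre.count c := List.one_le_count_iff.mpr (by rw [hcx]; exact hxpre)
            have h2 : (pre ++ [x]).count c = pre.count c + 1 := by
              rw [List.count_append, hcx]; simp
            rw [h2]
            exact ⟨fun _ => by omega, fun _ => Or.inr hcx⟩
          · have h2 : (pre ++ [x]).count c = pre.count c := by
              rw [List.count_append,
                show List.count c [x] = 0 from List.count_eq_zero.mpr (by simp [hcx]),
                Nat.add_zero]
            rw [h2]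
            simp [hcx])
      simp only [List.append_assoc, List.singleton_append] at step
      rw [List.foldl_cons, if_pos hx]
      exact step
    · have hxpre : x ∉ pre := fun h => hx ((PySem.Set.contains_iff seen x).mpr ((hseen x).mpr h))
      have step := ih (pre ++ [x]) (seen.add x) dups
        (by
          intro c
          rw [PySem.Set.mem_add, hseen c, List.mem_append, List.mem_singleton])
        hnd
        (by
          intro c
          rw [hdup c]
          by_cases hcx : c = x
          · have h0 : pre.count c = 0 := List.count_eq_zero.mpr (by rw [hcx]; exact hxpre)
            have h2 : (pre ++ [x]).count c = 1 := by
              rw [List.count_append, h0, hcx]; simp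
            rw [h0, h2]
            omega
          · have h2 : (pre ++ [x]).count c = pre.count c := by
              rw [List.count_append,
                show List.count c [x] = 0 from List.count_eq_zero.mpr (by simp [hcx]),
                Nat.add_zero]
            rw [h2])
      simp only [List.append_assoc, List.singleton_append] at step
      rw [List.foldl_cons, if_neg hx]
      exact step

-- ===== VERDICT (by name: the statement is the Claim_ definition above) =====
theorem calc_number_spec : Claim_equal_calc_number := by
  intro coords _
  show calc_number coords = calc_number_alt coords
  have hvals : (PySem.Dict.counter coords).values
      = (PySem.Set.ofList coords).map (fun k => ((coords.count k : Int))) := by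
    show ((PySem.Dict.counter coords).items).map Prod.snd = _
    rw [PySem.Dict.items_counter]
    simp [List.map_map, Function.comp]
  have hA : calc_number coords
      = ((PySem.Set.ofList coords).countP (fun k => decide (1 < coords.count k)) : Int) := by
    simp only [calc_number, calcA_dict_eq_counter, hvals]
    rw [PySem.List.foldl_ite_add_one (fun v => v > 1), List.countP_map]
    have hp : ((fun (v : Int) => decide (1 < v)) ∘ fun k => ((coords.count k : Int)))
        = (fun k => decide (1 < coords.count k)) := by
      funext k; simp [Function.comp]
    rw [hp]
    simp
  obtain ⟨hnd, hmem⟩ := calcB_inv coords [] PySem.Set.empty PySem.Set.empty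
    (by simp [PySem.Set.empty]) (by simp [PySem.Set.empty]) (by simp [PySem.Set.empty])
  simp only [List.nil_append] at hmem
  have hB : calc_number_alt coords
      = ((coords.foldl (fun (st : PySem.Set (Int × Int) × PySem.Set (Int × Int)) coord =>
          if st.1.contains coord then (st.1, st.2.add coord) else (st.1.add coord, st.2))
          (PySem.Set.empty, PySem.Set.empty)).2.length : Int) := by
    simp only [calc_number_alt]
    rw [PySem.Set.len_eq]
  rw [hA, hB]
  have hperm : ((PySem.Set.ofList coords).filter
      (fun k => decide (1 < coords.count k))).Perm
      (coords.foldl (fun (st : PySem.Set (Int × Int) × PySem.Set (Int × Int)) coord =>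
        if st.1.contains coord then (st.1, st.2.add coord) else (st.1.add coord, st.2))
        (PySem.Set.empty, PySem.Set.empty)).2 := by
    rw [List.perm_ext_iff_of_nodup (List.Nodup.filter _ (PySem.Set.nodup_ofList coords)) hnd]
    intro c
    rw [List.mem_filter, PySem.Set.mem_ofList, hmem c]
    constructor
    · rintro ⟨_, h⟩
      have h' : 1 < coords.count c := by simpa using h
      omega
    · intro h
      have hc : c ∈ coords := List.one_le_count_iff.mp (by omega)
      exact ⟨hc, by simp; omega⟩
  rw [← hperm.length_eq, ← List.countP_eq_length_filter]
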